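-- pv_equiv track=rewrite | github.com/eddiethedean/ryact | scripts/apply_parity_burndown_inventory.py | _patch_wave_burndown_v25_react_incremental_scheduling
-- ===== SOURCE A (Python) =====
-- _BURNDOWN_V25_REACT_IMPLEMENTATIONS: tuple[tuple[str, str, str], ...] = (
--     (
--         "react.ReactIncrementalScheduling-test.reactincrementalscheduling."
--         "schedules_and_flushes_deferred_work",
--         "react.incrementalScheduling.deferredFlush",
--         "tests_upstream/react/test_incremental_scheduling.py",
--     ),
--     (
--         "react.ReactIncrementalScheduling-test.reactincrementalscheduling."
--         "schedules_top_level_updates_in_order_of_priority",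
--         "react.incrementalScheduling.topLevelPriorityOrder",
--         "tests_upstream/react/test_incremental_scheduling.py",
--     ),
--     (
--         "react.ReactIncrementalScheduling-test.reactincrementalscheduling."
--         "schedules_top_level_updates_with_same_priority_in_order_of_insertion",
--         "react.incrementalScheduling.topLevelInsertionOrder",
--         "tests_upstream/react/test_incremental_scheduling.py",
--     ),
--     (
--         "react.ReactIncrementalScheduling-test.reactincrementalscheduling."
--         "schedules_sync_updates_when_inside_componentdidmount_update",
--         "react.incrementalScheduling.syncUpdatesInsideDidMountUpdate",
--         "tests_upstream/react/test_incremental_scheduling.py",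
--     ),
--     (
--         "react.ReactIncrementalScheduling-test.reactincrementalscheduling."
--         "can_opt_in_to_async_scheduling_inside_componentdidmount_update",
--         "react.incrementalScheduling.transitionOptInInsideDidMountUpdate",
--         "tests_upstream/react/test_incremental_scheduling.py",
--     ),
--     (
--         "react.ReactIncrementalScheduling-test.reactincrementalscheduling."
--         "performs_task_work_even_after_time_runs_out",
--         "react.incrementalScheduling.taskAfterTimeRunsOut",
--         "tests_upstream/react/test_incremental_scheduling.py",
--     ),
-- )
--
-- _BURNDOWN_V25_REACT_NON_GOALS: tuple[str, ...] = (
--     "react.ReactIncrementalScheduling-test.reactincrementalscheduling."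
--     "searches_for_work_on_other_roots_once_the_current_root_completes",
--     "react.ReactIncrementalScheduling-test.reactincrementalscheduling."
--     "works_on_deferred_roots_in_the_order_they_were_scheduled",
-- )
--
-- def _patch_wave_burndown_v25_react_incremental_scheduling(cases: list[dict]) -> int:
--     changed = 0
--     non_goal_rationale = (
--         "Deferred: requires multi-root noop renderer + cross-root scheduling/flush semantics."
--     )
--     for row_id, manifest_id, py_test in _BURNDOWN_V25_REACT_IMPLEMENTATIONS:
--         for c in cases:
--             if c.get("id") != row_id or c.get("status") != "pending":
--                 continue
--             c["status"] = "implemented"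
--             c["manifest_id"] = manifest_id
--             c["python_test"] = py_test
--             c["non_goal_rationale"] = None
--             changed += 1
--             break
--
--     targets = set(_BURNDOWN_V25_REACT_NON_GOALS)
--     for c in cases:
--         if c.get("id") not in targets:
--             continue
--         if c.get("status") != "pending":
--             continue
--         c["status"] = "non_goal"
--         c["manifest_id"] = None
--         c["python_test"] = None
--         c["non_goal_rationale"] = non_goal_rationale
--         changed += 1
--
--     return changed
-- ===== SOURCE B (Python) =====
-- _BURNDOWN_V25_REACT_IMPLEMENTATIONS: tuple[tuple[str, str, str], ...] = (
--     (
--         "react.ReactIncrementalScheduling-test.reactincrementalscheduling."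
--         "schedules_and_flushes_deferred_work",
--         "react.incrementalScheduling.deferredFlush",
--         "tests_upstream/react/test_incremental_scheduling.py",
--     ),
--     (
--         "react.ReactIncrementalScheduling-test.reactincrementalscheduling."
--         "schedules_top_level_updates_in_order_of_priority",
--         "react.incrementalScheduling.topLevelPriorityOrder",
--         "tests_upstream/react/test_incremental_scheduling.py",
--     ),
--     (
--         "react.ReactIncrementalScheduling-test.reactincrementalscheduling."
--         "schedules_top_level_updates_with_same_priority_in_order_of_insertion",
--         "react.incrementalScheduling.topLevelInsertionOrder",
--         "tests_upstream/react/test_incremental_scheduling.py",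
--     ),
--     (
--         "react.ReactIncrementalScheduling-test.reactincrementalscheduling."
--         "schedules_sync_updates_when_inside_componentdidmount_update",
--         "react.incrementalScheduling.syncUpdatesInsideDidMountUpdate",
--         "tests_upstream/react/test_incremental_scheduling.py",
--     ),
--     (
--         "react.ReactIncrementalScheduling-test.reactincrementalscheduling."
--         "can_opt_in_to_async_scheduling_inside_componentdidmount_update",
--         "react.incrementalScheduling.transitionOptInInsideDidMountUpdate",
--         "tests_upstream/react/test_incremental_scheduling.py",
--     ),
--     (
--         "react.ReactIncrementalScheduling-test.reactincrementalscheduling."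
--         "performs_task_work_even_after_time_runs_out",
--         "react.incrementalScheduling.taskAfterTimeRunsOut",
--         "tests_upstream/react/test_incremental_scheduling.py",
--     ),
-- )
--
-- _BURNDOWN_V25_REACT_NON_GOALS: tuple[str, ...] = (
--     "react.ReactIncrementalScheduling-test.reactincrementalscheduling."
--     "searches_for_work_on_other_roots_once_the_current_root_completes",
--     "react.ReactIncrementalScheduling-test.reactincrementalscheduling."
--     "works_on_deferred_roots_in_the_order_they_were_scheduled",
-- )
--
--
-- def _patch_wave_burndown_v25_react_incremental_scheduling(cases: list[dict]) -> int:
--     # One pass over `cases` driven by a precomputed id -> row index and a non-goal set.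
--     impl_map = {
--         row_id: (manifest_id, py_test)
--         for row_id, manifest_id, py_test in _BURNDOWN_V25_REACT_IMPLEMENTATIONS
--     }
--     non_goals = set(_BURNDOWN_V25_REACT_NON_GOALS)
--     rationale = (
--         "Deferred: requires multi-root noop renderer + cross-root scheduling/flush semantics."
--     )
--     consumed: set[str] = set()
--     changed = 0
--     for c in cases:
--         if c.get("status") != "pending":
--             continue
--         cid = c.get("id")
--         if cid in impl_map and cid not in consumed:
--             manifest_id, py_test = impl_map[cid]
--             c["status"] = "implemented"
--             c["manifest_id"] = manifest_id
--             c["python_test"] = py_test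
--             c["non_goal_rationale"] = None
--             consumed.add(cid)
--             changed += 1
--         elif cid in non_goals:
--             c["status"] = "non_goal"
--             c["manifest_id"] = None
--             c["python_test"] = None
--             c["non_goal_rationale"] = rationale
--             changed += 1
--     return changed
-- ===== Notes on version B (the rewrite author's own statement) =====
-- stated objective: simpler
-- what changed: Replaces A's rows-outer pass (one full scan of cases per implementation row, then a second scan for non-goals) by a single pass over cases driven by a precomputed id->row dict, a non-goal set and a consumed set that reproduces A's first-pending-per-id semantics.
import Mathlib
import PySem

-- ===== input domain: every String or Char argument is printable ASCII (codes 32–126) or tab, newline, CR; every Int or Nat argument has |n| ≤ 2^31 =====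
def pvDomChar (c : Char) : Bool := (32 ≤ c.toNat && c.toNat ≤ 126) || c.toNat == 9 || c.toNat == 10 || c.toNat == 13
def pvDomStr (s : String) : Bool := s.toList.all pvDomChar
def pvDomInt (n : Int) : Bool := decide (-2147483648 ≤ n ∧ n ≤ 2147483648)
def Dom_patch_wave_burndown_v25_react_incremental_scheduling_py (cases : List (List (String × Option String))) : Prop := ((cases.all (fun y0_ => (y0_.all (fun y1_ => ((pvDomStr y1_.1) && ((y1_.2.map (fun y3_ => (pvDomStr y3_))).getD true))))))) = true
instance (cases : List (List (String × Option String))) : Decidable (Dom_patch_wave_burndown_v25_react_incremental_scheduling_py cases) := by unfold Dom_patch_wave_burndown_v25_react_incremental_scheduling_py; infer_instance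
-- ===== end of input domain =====

-- B replaces A's rows-outer pass (one scan of `cases` per implementation row plus a second
-- non-goal scan) by a single pass over `cases` with an id->row dict and a consumed set; the two
-- Pythons also mutate the case dicts identically in place — the theorems here are about the
-- RETURN value (the count of changed cases) only.

-- ===== PORT A =====
def pvImplRows : List (String × String × String) :=
  [ ("react.ReactIncrementalScheduling-test.reactincrementalscheduling.schedules_and_flushes_deferred_work",
     "react.incrementalScheduling.deferredFlush",
     "tests_upstream/react/test_incremental_scheduling.py"),
    ("react.ReactIncrementalScheduling-test.reactincrementalscheduling.schedules_top_level_updates_in_order_of_priority",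
     "react.incrementalScheduling.topLevelPriorityOrder",
     "tests_upstream/react/test_incremental_scheduling.py"),
    ("react.ReactIncrementalScheduling-test.reactincrementalscheduling.schedules_top_level_updates_with_same_priority_in_order_of_insertion",
     "react.incrementalScheduling.topLevelInsertionOrder",
     "tests_upstream/react/test_incremental_scheduling.py"),
    ("react.ReactIncrementalScheduling-test.reactincrementalscheduling.schedules_sync_updates_when_inside_componentdidmount_update",
     "react.incrementalScheduling.syncUpdatesInsideDidMountUpdate",
     "tests_upstream/react/test_incremental_scheduling.py"),
    ("react.ReactIncrementalScheduling-test.reactincrementalscheduling.can_opt_in_to_async_scheduling_inside_componentdidmount_update",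
     "react.incrementalScheduling.transitionOptInInsideDidMountUpdate",
     "tests_upstream/react/test_incremental_scheduling.py"),
    ("react.ReactIncrementalScheduling-test.reactincrementalscheduling.performs_task_work_even_after_time_runs_out",
     "react.incrementalScheduling.taskAfterTimeRunsOut",
     "tests_upstream/react/test_incremental_scheduling.py") ]

def pvNonGoals : List String :=
  [ "react.ReactIncrementalScheduling-test.reactincrementalscheduling.searches_for_work_on_other_roots_once_the_current_root_completes",
    "react.ReactIncrementalScheduling-test.reactincrementalscheduling.works_on_deferred_roots_in_the_order_they_were_scheduled" ]

-- Python's `x in <set of strings>` where x = c.get(k) may be None (no key / value None): only a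
-- present string value can be a member.
def pvIdIn (v : Option (Option String)) (ts : List String) : Bool :=
  match v with
  | some (some s) => ts.contains s
  | _ => false

-- A's inner `for c in cases: … break` for one implementation row: returns the updated list and
-- the 0/1 increment to `changed`.
def pvInnerA (rid mid pt : String) :
    List (List (String × Option String)) → List (List (String × Option String)) × Int
  | [] => ([], 0)
  | c :: rest =>
    if PySem.Dict.get? (PySem.Dict.mk c) "id" ≠ some (some rid) ∨
       PySem.Dict.get? (PySem.Dict.mk c) "status" ≠ some (some "pending") then
      let p := pvInnerA rid mid pt rest
      (c :: p.1, p.2)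
    else
      ((((((PySem.Dict.mk c).insert "status" (some "implemented")).insert "manifest_id"
          (some mid)).insert "python_test" (some pt)).insert "non_goal_rationale" none).items
        :: rest, 1)

-- A's outer loop over _BURNDOWN_V25_REACT_IMPLEMENTATIONS, threading (cases, changed).
def pvLoop1A : List (String × String × String) →
    List (List (String × Option String)) × Int → List (List (String × Option String)) × Int
  | [], st => st
  | (rid, mid, pt) :: rows, (cs, ch) =>
      let p := pvInnerA rid mid pt cs
      pvLoop1A rows (p.1, ch + p.2)

def patch_wave_burndown_v25_react_incremental_scheduling_py (cases : List (List (String × Option String))) : Int :=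
  let st := pvLoop1A pvImplRows (cases, 0)
  let targets : PySem.Set String := PySem.Set.ofList pvNonGoals
  -- second loop: the in-place field updates of `c` are not re-read (each element is visited
  -- once and the function returns only `changed`), so only the count is threaded
  st.1.foldl (fun ch c =>
    if pvIdIn (PySem.Dict.get? (PySem.Dict.mk c) "id") targets then
      if PySem.Dict.get? (PySem.Dict.mk c) "status" ≠ some (some "pending") then ch
      else ch + 1
    else ch) st.2

-- ===== PORT B =====
-- impl_map = {row_id: (manifest_id, py_test) for …}
def pvImplMap : PySem.Dict String (String × String) :=
  PySem.Dict.ofList (pvImplRows.map (fun r => (r.1, r.2)))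

-- body of B's single `for c in cases` loop, state = (changed, consumed); the in-place field
-- updates of `c` (values taken from impl_map[cid]) are not re-read, so only this state is kept
def pvAltStep (st : Int × PySem.Set String)
    (c : List (String × Option String)) : Int × PySem.Set String :=
  if PySem.Dict.get? (PySem.Dict.mk c) "status" ≠ some (some "pending") then st
  else
    match PySem.Dict.get? (PySem.Dict.mk c) "id" with
    | some (some cid) =>
        if pvImplMap.contains cid && !(PySem.Set.contains st.2 cid) then
          (st.1 + 1, PySem.Set.add st.2 cid)
        else if PySem.Set.contains (PySem.Set.ofList pvNonGoals) cid then
          (st.1 + 1, st.2)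
        else st
    | _ => st

def patch_wave_burndown_v25_react_incremental_scheduling_py_alt (cases : List (List (String × Option String))) : Int :=
  (cases.foldl pvAltStep (0, PySem.Set.empty)).1

-- ===== PRECONDITION & SPEC =====
def Spec_patch_wave_burndown_v25_react_incremental_scheduling_py (cases : List (List (String × Option String))) (out : Int) : Prop := out = patch_wave_burndown_v25_react_incremental_scheduling_py_alt cases
instance (cases : List (List (String × Option String))) (out : Int) : Decidable (Spec_patch_wave_burndown_v25_react_incremental_scheduling_py cases out) := by unfold Spec_patch_wave_burndown_v25_react_incremental_scheduling_py; infer_instance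

-- ===== CLAIM (what is proved, stated in full; the proofs are below) =====
def Claim_equal_patch_wave_burndown_v25_react_incremental_scheduling_py : Prop := ∀ (cases : List (List (String × Option String))), Dom_patch_wave_burndown_v25_react_incremental_scheduling_py cases → Spec_patch_wave_burndown_v25_react_incremental_scheduling_py cases (patch_wave_burndown_v25_react_incremental_scheduling_py cases)

-- ===== LEMMAS AND PROOFS =====

-- abstractions of what both counts depend on, per case: its id value and whether it is pending
def pvPend (c : List (String × Option String)) : Bool :=
  PySem.Dict.get? (PySem.Dict.mk c) "status" == some (some "pending")

def pvMatch (r : String) (c : List (String × Option String)) : Bool :=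
  (PySem.Dict.get? (PySem.Dict.mk c) "id" == some (some r)) && pvPend c

def pvHas (r : String) (cs : List (List (String × Option String))) : Bool :=
  cs.any (pvMatch r)

def pvNgCnt (cs : List (List (String × Option String))) : Int :=
  (cs.countP (fun c => pvIdIn (PySem.Dict.get? (PySem.Dict.mk c) "id") pvNonGoals && pvPend c) : Int)

def pvRowSum (consumed : List String) (cs : List (List (String × Option String)))
    (rows : List (String × String × String)) : Int :=
  (rows.map (fun r => if !consumed.contains r.1 && pvHas r.1 cs then (1:Int) else 0)).sum

lemma pv_mk_items {κ ν : Type} (d : PySem.Dict κ ν) : PySem.Dict.mk d.items = d := rfl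

set_option maxRecDepth 100000 in
lemma pv_ng_nodup : pvNonGoals.Nodup := by decide

set_option maxRecDepth 100000 in
lemma pv_impl_nodup : (pvImplRows.map (·.1)).Nodup := by decide

set_option maxRecDepth 100000 in
lemma pv_disj_rows : ∀ r ∈ pvImplRows, pvNonGoals.contains r.1 = false := by decide

set_option maxRecDepth 100000 in
lemma pv_disj (s : String) (h : s ∈ pvImplRows.map (·.1)) :
    pvNonGoals.contains s = false := by
  simp [pvImplRows] at h
  rcases h with rfl | rfl | rfl | rfl | rfl | rfl <;> decide

set_option maxRecDepth 1000000 in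
lemma pv_implMap_keys : pvImplMap.keys = pvImplRows.map (·.1) := by decide

lemma pv_implMap_contains (s : String) :
    pvImplMap.contains s = (pvImplRows.map (·.1)).contains s := by
  rw [Bool.eq_iff_iff]
  rw [PySem.Dict.contains_iff_mem_keys, pv_implMap_keys]
  simp

-- the mutated case keeps its id and stops being pending
lemma pv_mut_id (c : List (String × Option String)) (mid pt : String) :
    PySem.Dict.get? (PySem.Dict.mk (((((PySem.Dict.mk c).insert "status" (some "implemented")).insert "manifest_id"
          (some mid)).insert "python_test" (some pt)).insert "non_goal_rationale" none).items) "id"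
      = PySem.Dict.get? (PySem.Dict.mk c) "id" := by
  rw [pv_mk_items]
  simp [PySem.Dict.get?_insert]

lemma pv_mut_pend (c : List (String × Option String)) (mid pt : String) :
    pvPend (((((PySem.Dict.mk c).insert "status" (some "implemented")).insert "manifest_id"
          (some mid)).insert "python_test" (some pt)).insert "non_goal_rationale" none).items = false := by
  unfold pvPend
  rw [pv_mk_items]
  simp [PySem.Dict.get?_insert]

lemma pv_innerA_snd (rid mid pt : String) (cs : List (List (String × Option String))) :
    (pvInnerA rid mid pt cs).2 = if pvHas rid cs then 1 else 0 := by
  induction cs with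
  | nil => simp [pvInnerA, pvHas]
  | cons c cs ih =>
    by_cases hc : PySem.Dict.get? (PySem.Dict.mk c) "id" ≠ some (some rid) ∨
        PySem.Dict.get? (PySem.Dict.mk c) "status" ≠ some (some "pending")
    · have hm : pvMatch rid c = false := by
        unfold pvMatch pvPend
        rcases hc with hc | hc <;> simp [hc]
      simp only [pvInnerA, if_pos hc]
      simpa [pvHas, hm] using ih
    · have hc' := hc
      push Not at hc'
      have hm : pvMatch rid c = true := by
        unfold pvMatch pvPend; simp [hc'.1, hc'.2]
      simp only [pvInnerA, if_neg hc]
      simp [pvHas, hm]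

lemma pv_innerA_has (rid mid pt s : String) (cs : List (List (String × Option String)))
    (h : s ≠ rid) : pvHas s (pvInnerA rid mid pt cs).1 = pvHas s cs := by
  induction cs with
  | nil => simp [pvInnerA]
  | cons c cs ih =>
    by_cases hc : PySem.Dict.get? (PySem.Dict.mk c) "id" ≠ some (some rid) ∨
        PySem.Dict.get? (PySem.Dict.mk c) "status" ≠ some (some "pending")
    · simp only [pvInnerA, if_pos hc]
      simp [pvHas] at ih ⊢
      rw [ih]
    · have hc' := hc
      push Not at hc'
      simp only [pvInnerA, if_neg hc]
      have hmut : pvMatch s (((((PySem.Dict.mk c).insert "status" (some "implemented")).insert "manifest_id"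
          (some mid)).insert "python_test" (some pt)).insert "non_goal_rationale" none).items = false := by
        unfold pvMatch
        simp [pv_mut_pend]
      have hcm : pvMatch s c = false := by
        unfold pvMatch
        simp [hc'.1]
        intro he
        exact absurd he.symm h
      simp [pvHas, hmut, hcm]

lemma pv_innerA_ng (rid mid pt : String) (cs : List (List (String × Option String)))
    (h : pvNonGoals.contains rid = false) :
    pvNgCnt (pvInnerA rid mid pt cs).1 = pvNgCnt cs := by
  induction cs with
  | nil => simp [pvInnerA]
  | cons c cs ih =>
    by_cases hc : PySem.Dict.get? (PySem.Dict.mk c) "id" ≠ some (some rid) ∨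
        PySem.Dict.get? (PySem.Dict.mk c) "status" ≠ some (some "pending")
    · simp only [pvInnerA, if_pos hc]
      simp [pvNgCnt, List.countP_cons] at ih ⊢
      rw [ih]
    · have hc' := hc
      push Not at hc'
      simp only [pvInnerA, if_neg hc]
      have hmut : pvPend (((((PySem.Dict.mk c).insert "status" (some "implemented")).insert "manifest_id"
          (some mid)).insert "python_test" (some pt)).insert "non_goal_rationale" none).items = false :=
        pv_mut_pend c mid pt
      have hcm : pvIdIn (PySem.Dict.get? (PySem.Dict.mk c) "id") pvNonGoals = false := by
        rw [hc'.1]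
        simpa [pvIdIn] using h
      simp [pvNgCnt, hmut, hcm, pv_mut_id]

lemma pvNgCnt_cons (c : List (String × Option String)) (cs : List (List (String × Option String))) :
    pvNgCnt (c :: cs) =
      (if pvIdIn (PySem.Dict.get? (PySem.Dict.mk c) "id") pvNonGoals && pvPend c then (1:Int) else 0)
        + pvNgCnt cs := by
  simp [pvNgCnt, List.countP_cons]
  split_ifs <;> omega

lemma pv_contains_add_of_ne (consumed : List String) (cid s : String) (h : s ≠ cid) :
    List.contains (PySem.Set.add consumed cid) s = consumed.contains s := by
  by_cases hm : cid ∈ consumed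
  · rw [PySem.Set.add_of_mem hm]
  · rw [PySem.Set.add_of_not_mem hm]
    rw [Bool.eq_iff_iff]
    simp [h]

lemma pv_contains_add_self (consumed : List String) (cid : String) :
    List.contains (PySem.Set.add consumed cid) cid = true := by
  by_cases hm : cid ∈ consumed
  · rw [PySem.Set.add_of_mem hm]; simp [hm]
  · rw [PySem.Set.add_of_not_mem hm]; simp

lemma pv_rowSum_shift (consumed : List String) (c : List (String × Option String))
    (cs : List (List (String × Option String))) (rows : List (String × String × String))
    (cid : String)
    (hid : PySem.Dict.get? (PySem.Dict.mk c) "id" = some (some cid))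
    (hne : ∀ r ∈ rows, r.1 ≠ cid) :
    pvRowSum consumed (c :: cs) rows = pvRowSum (PySem.Set.add consumed cid) cs rows := by
  unfold pvRowSum
  congr 1
  apply List.map_congr_left
  intro r hr
  have hm : pvMatch r.1 c = false := by
    unfold pvMatch
    simp [hid]
    intro he
    exact absurd he.symm (hne r hr)
  have hne' := hne r hr
  simp [pvHas, hm, hne']

lemma pv_loop1A_spec (rows : List (String × String × String))
    (cs : List (List (String × Option String))) (ch : Int)
    (hnd : (rows.map (·.1)).Nodup)
    (hdis : ∀ r ∈ rows, pvNonGoals.contains r.1 = false) :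
    (pvLoop1A rows (cs, ch)).2 = ch + pvRowSum [] cs rows ∧
      pvNgCnt (pvLoop1A rows (cs, ch)).1 = pvNgCnt cs := by
  induction rows generalizing cs ch with
  | nil => simp [pvLoop1A, pvRowSum]
  | cons r rows ih =>
    obtain ⟨rid, mid, pt⟩ := r
    simp only [List.map_cons, List.nodup_cons] at hnd
    have hdis' : ∀ r ∈ rows, pvNonGoals.contains r.1 = false := by
      intro r hr; exact hdis r (List.mem_cons_of_mem _ hr)
    have ihx := ih (pvInnerA rid mid pt cs).1 (ch + (pvInnerA rid mid pt cs).2) hnd.2 hdis'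
    simp only [pvLoop1A]
    constructor
    · rw [ihx.1]
      have hsum : pvRowSum [] (pvInnerA rid mid pt cs).1 rows = pvRowSum [] cs rows := by
        unfold pvRowSum
        congr 1
        apply List.map_congr_left
        intro r' hr'
        have hne : r'.1 ≠ rid := by
          intro hEq
          exact hnd.1 (by rw [← hEq]; exact List.mem_map_of_mem hr')
        rw [pv_innerA_has rid mid pt r'.1 cs hne]
      rw [hsum, pv_innerA_snd]
      unfold pvRowSum
      simp only [List.map_cons, List.sum_cons]
      have hnilc : List.contains ([] : List String) rid = false := rfl
      rw [hnilc]
      simp only [Bool.not_false, Bool.true_and]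
      split_ifs <;> ring
    · rw [ihx.2]
      exact pv_innerA_ng rid mid pt cs (hdis (rid, mid, pt) List.mem_cons_self)

lemma pv_loop2_spec (cs : List (List (String × Option String))) (ch : Int) :
    cs.foldl (fun ch c =>
      if pvIdIn (PySem.Dict.get? (PySem.Dict.mk c) "id") (PySem.Set.ofList pvNonGoals) then
        if PySem.Dict.get? (PySem.Dict.mk c) "status" ≠ some (some "pending") then ch
        else ch + 1
      else ch) ch = ch + pvNgCnt cs := by
  have hng : PySem.Set.ofList pvNonGoals = pvNonGoals :=
    PySem.Set.ofList_eq_self_of_nodup _ pv_ng_nodup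
  induction cs generalizing ch with
  | nil => simp [pvNgCnt]
  | cons c cs ih =>
    simp only [List.foldl_cons]
    rw [ih, pvNgCnt_cons]
    rw [hng]
    by_cases h1 : pvIdIn (PySem.Dict.get? (PySem.Dict.mk c) "id") pvNonGoals = true
    · by_cases h2 : PySem.Dict.get? (PySem.Dict.mk c) "status" = some (some "pending")
      · have hpend : pvPend c = true := by simp [pvPend, h2]
        rw [if_pos h1, if_neg (by simpa using h2)]
        simp [h1, hpend]
        ring
      · have hpend : pvPend c = false := by simp [pvPend, h2]
        rw [if_pos h1, if_pos (by simpa using h2)]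
        simp [hpend]
    · have h1' : pvIdIn (PySem.Dict.get? (PySem.Dict.mk c) "id") pvNonGoals = false := by
        simpa using h1
      rw [if_neg (by simp [h1'])]
      simp [h1']

lemma pv_rowSum_skip (consumed : List String) (c : List (String × Option String))
    (cs : List (List (String × Option String))) (rows : List (String × String × String))
    (h : ∀ r ∈ rows, pvMatch r.1 c = true → consumed.contains r.1 = true) :
    pvRowSum consumed (c :: cs) rows = pvRowSum consumed cs rows := by
  unfold pvRowSum
  congr 1
  apply List.map_congr_left
  intro r hr
  have hh : pvHas r.1 (c :: cs) = (pvMatch r.1 c || pvHas r.1 cs) := by simp [pvHas]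
  rw [hh]
  by_cases hcon : consumed.contains r.1 = true
  · have : r.1 ∈ consumed := by simpa using hcon
    simp [this]
  · have hb : consumed.contains r.1 = false := by simpa using hcon
    have hm : pvMatch r.1 c = false := by
      cases hmc : pvMatch r.1 c
      · rfl
      · rw [h r hr hmc] at hb
        cases hb
    simp [hm]

lemma pv_rowSum_consume (consumed : List String) (c : List (String × Option String))
    (cs : List (List (String × Option String))) (rows : List (String × String × String))
    (cid : String)
    (hid : PySem.Dict.get? (PySem.Dict.mk c) "id" = some (some cid))
    (hp : pvPend c = true)
    (hmem : cid ∈ rows.map (·.1)) (hnd : (rows.map (·.1)).Nodup)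
    (hcon : consumed.contains cid = false) :
    pvRowSum consumed (c :: cs) rows = 1 + pvRowSum (PySem.Set.add consumed cid) cs rows := by
  induction rows with
  | nil => simp at hmem
  | cons r rows ih =>
    simp only [List.map_cons, List.nodup_cons] at hnd
    by_cases he : r.1 = cid
    · have hrest : ∀ r' ∈ rows, r'.1 ≠ cid := by
        intro r' hr' hEq
        exact hnd.1 (by rw [he, ← hEq]; exact List.mem_map_of_mem hr')
      have hshift := pv_rowSum_shift consumed c cs rows cid hid hrest
      unfold pvRowSum at hshift ⊢
      simp only [List.map_cons, List.sum_cons]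
      have hhead : pvHas r.1 (c :: cs) = true := by
        simp [pvHas, pvMatch, hid, he, hp]
      have hterm1 : (if !consumed.contains r.1 && pvHas r.1 (c :: cs) then (1:Int) else 0) = 1 := by
        rw [hhead, he, hcon]
        simp
      have hterm2 : (if !(List.contains (PySem.Set.add consumed cid) r.1) && pvHas r.1 cs then (1:Int) else 0) = 0 := by
        rw [he, pv_contains_add_self]
        simp
      rw [hterm1, hterm2, hshift]
      ring
    · have hmem' : cid ∈ rows.map (·.1) := by
        rcases List.mem_cons.1 hmem with h0 | h0
        · exact absurd h0.symm he
        · exact h0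
      have ihx := ih hmem' hnd.2
      unfold pvRowSum at ihx ⊢
      simp only [List.map_cons, List.sum_cons]
      have h1 := pv_contains_add_of_ne consumed cid r.1 he
      have hm : pvMatch r.1 c = false := by
        unfold pvMatch
        simp [hid]
        intro hEq
        exact absurd hEq.symm he
      have hh : pvHas r.1 (c :: cs) = pvHas r.1 cs := by simp [pvHas, hm]
      rw [hh, ihx, h1]
      ring

set_option maxRecDepth 400000 in
lemma pv_altFold_spec (cs : List (List (String × Option String))) (ch : Int)
    (consumed : PySem.Set String) :
    (cs.foldl pvAltStep (ch, consumed)).1 = ch + pvRowSum consumed cs pvImplRows + pvNgCnt cs := by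
  induction cs generalizing ch consumed with
  | nil => simp [pvRowSum, pvHas, pvNgCnt]
  | cons c cs ih =>
    simp only [List.foldl_cons]
    by_cases hp : PySem.Dict.get? (PySem.Dict.mk c) "status" = some (some "pending")
    · have hpend : pvPend c = true := by simp [pvPend, hp]
      cases hid : PySem.Dict.get? (PySem.Dict.mk c) "id" with
      | none =>
        have hstep : pvAltStep (ch, consumed) c = (ch, consumed) := by
          unfold pvAltStep
          rw [if_neg (by simpa using hp), hid]
        rw [hstep, ih]
        have hskip := pv_rowSum_skip consumed c cs pvImplRows (by
          intro r hr hm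
          unfold pvMatch at hm
          rw [hid] at hm
          simp at hm)
        rw [hskip, pvNgCnt_cons]
        have : pvIdIn (PySem.Dict.get? (PySem.Dict.mk c) "id") pvNonGoals = false := by
          rw [hid]; rfl
        rw [this]
        simp
      | some o =>
        cases o with
        | none =>
          have hstep : pvAltStep (ch, consumed) c = (ch, consumed) := by
            unfold pvAltStep
            rw [if_neg (by simpa using hp), hid]
          rw [hstep, ih]
          have hskip := pv_rowSum_skip consumed c cs pvImplRows (by
            intro r hr hm
            unfold pvMatch at hm
            rw [hid] at hm
            simp at hm)
          rw [hskip, pvNgCnt_cons]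
          have : pvIdIn (PySem.Dict.get? (PySem.Dict.mk c) "id") pvNonGoals = false := by
            rw [hid]; rfl
          rw [this]
          simp
        | some cid =>
          by_cases hb1 : (pvImplMap.contains cid && !(PySem.Set.contains consumed cid)) = true
          · have hstep : pvAltStep (ch, consumed) c = (ch + 1, PySem.Set.add consumed cid) := by
              unfold pvAltStep
              rw [if_neg (by simpa using hp), hid]
              simp only [hb1, if_pos]
            rw [hstep, ih]
            have hb1' : pvImplMap.contains cid = true ∧ ¬ (cid ∈ consumed) := by
              simpa [Bool.and_eq_true] using hb1
            have hmem : cid ∈ pvImplRows.map (·.1) := by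
              have h1 := hb1'.1
              rw [pv_implMap_contains] at h1
              simpa using h1
            have hcon : consumed.contains cid = false := by
              simpa using hb1'.2
            rw [pv_rowSum_consume consumed c cs pvImplRows cid hid hpend hmem pv_impl_nodup hcon]
            rw [pvNgCnt_cons]
            have hngf : pvIdIn (PySem.Dict.get? (PySem.Dict.mk c) "id") pvNonGoals = false := by
              rw [hid]
              simpa [pvIdIn] using pv_disj cid hmem
            rw [hngf]
            simp
            ring
          · by_cases hb2 : PySem.Set.contains (PySem.Set.ofList pvNonGoals) cid = true
            · have hngcid : pvNonGoals.contains cid = true := by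
                rw [PySem.Set.ofList_eq_self_of_nodup _ pv_ng_nodup] at hb2
                exact hb2
              have hstep : pvAltStep (ch, consumed) c = (ch + 1, consumed) := by
                simp only [pvAltStep]
                rw [if_neg (by simpa using hp)]
                rw [hid]
                show (if (pvImplMap.contains cid && !consumed.contains cid) = true
                    then ((ch:Int) + 1, PySem.Set.add consumed cid)
                    else if (PySem.Set.ofList pvNonGoals).contains cid = true
                      then (ch + 1, consumed) else (ch, consumed)) = (ch + 1, consumed)
                rw [if_neg hb1, if_pos (by rw [PySem.Set.ofList_eq_self_of_nodup _ pv_ng_nodup]; exact hngcid)]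
              rw [hstep, ih]
              have hnotimpl : cid ∉ pvImplRows.map (·.1) := by
                intro hmem
                rw [pv_disj cid hmem] at hngcid
                cases hngcid
              have hskip := pv_rowSum_skip consumed c cs pvImplRows (by
                intro r hr hm
                unfold pvMatch at hm
                rw [hid] at hm
                have hm' : cid = r.1 ∧ pvPend c = true := by
                  simpa [Bool.and_eq_true] using hm
                have hr1 : r.1 = cid := hm'.1.symm
                exact absurd (hr1 ▸ List.mem_map_of_mem hr) hnotimpl)
              rw [hskip, pvNgCnt_cons]
              have hngt : pvIdIn (PySem.Dict.get? (PySem.Dict.mk c) "id") pvNonGoals = true := by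
                rw [hid]
                simpa [pvIdIn] using hngcid
              rw [hngt]
              simp [hpend]
              ring
            · have hngf' : pvNonGoals.contains cid = false := by
                by_contra hcc
                exact hb2 (by
                  rw [PySem.Set.ofList_eq_self_of_nodup _ pv_ng_nodup]
                  simpa using hcc)
              have hstep : pvAltStep (ch, consumed) c = (ch, consumed) := by
                simp only [pvAltStep]
                rw [if_neg (by simpa using hp)]
                rw [hid]
                show (if (pvImplMap.contains cid && !consumed.contains cid) = true
                    then ((ch:Int) + 1, PySem.Set.add consumed cid)
                    else if (PySem.Set.ofList pvNonGoals).contains cid = true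
                      then (ch + 1, consumed) else (ch, consumed)) = (ch, consumed)
                rw [if_neg hb1, if_neg hb2]
              rw [hstep, ih]
              have hskip := pv_rowSum_skip consumed c cs pvImplRows (by
                intro r hr hm
                unfold pvMatch at hm
                rw [hid] at hm
                have hm' : cid = r.1 ∧ pvPend c = true := by
                  simpa [Bool.and_eq_true] using hm
                have hr1 : r.1 = cid := hm'.1.symm
                have himpl : pvImplMap.contains cid = true := by
                  rw [pv_implMap_contains, Bool.eq_iff_iff]
                  constructor
                  · intro _; trivial
                  · intro _
                    simp only [List.contains_iff_exists_mem_beq]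
                    exact ⟨cid, by rw [← hr1]; exact List.mem_map_of_mem hr, by simp⟩
                have hcc : cid ∈ consumed := by
                  by_contra hcc
                  exact hb1 (by simp [himpl, hcc])
                rw [hr1]
                simpa using hcc)
              rw [hskip, pvNgCnt_cons]
              have hngf : pvIdIn (PySem.Dict.get? (PySem.Dict.mk c) "id") pvNonGoals = false := by
                rw [hid]
                have : pvNonGoals.contains cid = false := by
                  rw [PySem.Set.ofList_eq_self_of_nodup _ pv_ng_nodup] at hb2
                  simpa using hb2
                simpa [pvIdIn] using this
              rw [hngf]
              simp
    · have hpend : pvPend c = false := by simp [pvPend, hp]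
      have hstep : pvAltStep (ch, consumed) c = (ch, consumed) := by
        unfold pvAltStep
        rw [if_pos (by simpa using hp)]
      rw [hstep, ih]
      have hskip := pv_rowSum_skip consumed c cs pvImplRows (by
        intro r hr hm
        unfold pvMatch at hm
        rw [hpend] at hm
        simp at hm)
      rw [hskip, pvNgCnt_cons]
      simp [hpend]

-- ===== VERDICT (by name: the statement is the Claim_ definition above) =====
theorem patch_wave_burndown_v25_react_incremental_scheduling_py_spec : Claim_equal_patch_wave_burndown_v25_react_incremental_scheduling_py := by
  intro cases _
  unfold Spec_patch_wave_burndown_v25_react_incremental_scheduling_py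
  unfold patch_wave_burndown_v25_react_incremental_scheduling_py
  unfold patch_wave_burndown_v25_react_incremental_scheduling_py_alt
  rw [pv_loop2_spec, pv_altFold_spec]
  have h := pv_loop1A_spec pvImplRows cases 0 pv_impl_nodup pv_disj_rows
  rw [h.1, h.2]
  rfl
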